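-- pv_equiv track=rewrite | github.com/dylanhodge/fetch-nfl-scores | fetch-nfl-scores.py | find_caesars
-- ===== SOURCE A (Python) =====
-- def find_caesars(odds_items: list):
--     for item in odds_items:
--         if item["provider"]["name"] == "consensus":
--             return item
--     for item in odds_items:
--         if item["provider"]["name"] == "Caesars Sportsbook":
--             return item
--     for item in odds_items:
--         if item["provider"]["name"] == "DraftKings":
--             return item
--     if len(odds_items) > 0:
--         return odds_items[0]
--     return None
-- ===== SOURCE B (Python) =====
-- def find_caesars(odds_items: list):
--     caesars = None
--     draftkings = None
--     for item in odds_items: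
--         name = item["provider"]["name"]
--         if name == "consensus":
--             return item
--         if caesars is None and name == "Caesars Sportsbook":
--             caesars = item
--         if draftkings is None and name == "DraftKings":
--             draftkings = item
--     if caesars is not None:
--         return caesars
--     if draftkings is not None:
--         return draftkings
--     return odds_items[0] if odds_items else None
-- ===== Notes on version B (the rewrite author's own statement) =====
-- stated objective: simpler
-- what changed: Replaces A's three sequential scans plus fallback by a single pass that returns immediately on 'consensus' and remembers the first Caesars and first DraftKings items, resolving priority after the loop.
import Mathlib
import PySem

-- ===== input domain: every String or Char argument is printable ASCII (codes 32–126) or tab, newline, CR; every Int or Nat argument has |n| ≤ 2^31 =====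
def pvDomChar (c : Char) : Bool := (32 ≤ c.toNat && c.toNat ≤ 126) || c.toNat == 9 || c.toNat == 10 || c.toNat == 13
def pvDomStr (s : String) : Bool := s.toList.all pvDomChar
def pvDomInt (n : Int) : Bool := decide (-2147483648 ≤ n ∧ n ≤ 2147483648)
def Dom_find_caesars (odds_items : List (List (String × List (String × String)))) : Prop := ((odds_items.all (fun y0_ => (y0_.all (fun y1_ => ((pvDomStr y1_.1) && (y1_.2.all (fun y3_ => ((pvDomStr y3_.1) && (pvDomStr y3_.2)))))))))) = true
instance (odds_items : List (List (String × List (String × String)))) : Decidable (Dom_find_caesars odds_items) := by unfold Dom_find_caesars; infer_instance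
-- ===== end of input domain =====

-- B replaces A's three sequential scans with a single pass remembering the first
-- Caesars and first DraftKings items; equivalence of return values is proved below.

-- item["provider"]["name"]; total via defaults, exact wherever Pre_ admits the input
def pvName (item : List (String × List (String × String))) : String :=
  PySem.Dict.getD (PySem.Dict.mk (PySem.Dict.getD (PySem.Dict.mk item) "provider" [])) "name" ""

-- the same lookup as an Option: none exactly where Python raises KeyError
def pvName? (item : List (String × List (String × String))) : Option String :=
  ((PySem.Dict.mk item).get? "provider").bind (fun p => (PySem.Dict.mk p).get? "name")

-- ===== PORT A =====
def find_caesars (odds_items : List (List (String × List (String × String)))) : Option (List (String × List (String × String))) :=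
  match odds_items.find? (fun it => pvName it == "consensus") with
  | some it => some it
  | none =>
    match odds_items.find? (fun it => pvName it == "Caesars Sportsbook") with
    | some it => some it
    | none =>
      match odds_items.find? (fun it => pvName it == "DraftKings") with
      | some it => some it
      | none =>
        if odds_items.length > 0 then PySem.List.pyGet? odds_items 0 else none

-- ===== PORT B =====
-- the single for-loop of B, carrying the caesars/draftkings accumulators
def pvLoopB (caesars draftkings : Option (List (String × List (String × String)))) :
    List (List (String × List (String × String))) → Option (List (String × List (String × String)))
  | [] => caesars.or draftkings
  | it :: rest =>
    let n := pvName it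
    if n == "consensus" then some it
    else pvLoopB (if caesars.isNone && (n == "Caesars Sportsbook") then some it else caesars)
                 (if draftkings.isNone && (n == "DraftKings") then some it else draftkings) rest

def find_caesars_alt (odds_items : List (List (String × List (String × String)))) : Option (List (String × List (String × String))) :=
  match pvLoopB none none odds_items with
  | some r => some r
  | none => match odds_items with
            | [] => none
            | h :: _ => some h

-- ===== PRECONDITION & SPEC =====
-- Pre_ excludes exactly the inputs on which Python A raises KeyError: an item missing
-- "provider" or "name" that is not preceded by a 'consensus' item (B raises there too).
def Pre_find_caesars (odds_items : List (List (String × List (String × String)))) : Prop :=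
  ∀ i ∈ List.range odds_items.length, pvName? (odds_items.getD i []) = none →
    ∃ j ∈ List.range i, pvName? (odds_items.getD j []) = some "consensus"
instance (odds_items : List (List (String × List (String × String)))) : Decidable (Pre_find_caesars odds_items) := by unfold Pre_find_caesars; infer_instance

def pvWitness_find_caesars : (List (List (String × List (String × String)))) :=
  [[("provider", [("name", "DraftKings")])], [("provider", [("name", "consensus")])]]

def Spec_find_caesars (odds_items : List (List (String × List (String × String)))) (out : Option (List (String × List (String × String)))) : Prop := out = find_caesars_alt odds_items
instance (odds_items : List (List (String × List (String × String)))) (out : Option (List (String × List (String × String)))) : Decidable (Spec_find_caesars odds_items out) := by unfold Spec_find_caesars; infer_instance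

-- ===== CLAIM (what is proved, stated in full; the proofs are below) =====
def Claim_equal_find_caesars : Prop := ∀ (odds_items : List (List (String × List (String × String)))), Dom_find_caesars odds_items → Pre_find_caesars odds_items → Spec_find_caesars odds_items (find_caesars odds_items)

-- ===== LEMMAS AND PROOFS =====

-- the loop of B, with accumulators c and d, computes: the first consensus item if any,
-- else c (or, failing that, the first Caesars item), else d (or the first DraftKings item)
lemma pvLoopB_eq (l : List (List (String × List (String × String)))) :
    ∀ c d, pvLoopB c d l =
      match l.find? (fun it => pvName it == "consensus") with
      | some it => some it
      | none =>
        (c.or (l.find? (fun it => pvName it == "Caesars Sportsbook"))).or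
          (d.or (l.find? (fun it => pvName it == "DraftKings"))) := by
  induction l with
  | nil => intro c d; simp [pvLoopB]
  | cons it rest ih =>
    intro c d
    simp only [pvLoopB, List.find?_cons]
    by_cases h1 : pvName it == "consensus"
    · simp [h1]
    · simp only [h1, if_false, Bool.false_eq_true, ih]
      cases hf : rest.find? (fun it => pvName it == "consensus") with
      | some r => simp
      | none =>
        simp only []
        by_cases h2 : pvName it == "Caesars Sportsbook"
        · by_cases h3 : pvName it == "DraftKings"
          · exact absurd ((beq_iff_eq.mp h2).symm.trans (beq_iff_eq.mp h3)) (by decide)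
          · cases c <;> simp [h2, h3, Option.or]
        · by_cases h3 : pvName it == "DraftKings"
          · cases c <;> cases d <;> simp [h2, h3, Option.or]
          · cases c <;> cases d <;> simp [h2, h3, Option.or]

lemma ports_eq (odds_items : List (List (String × List (String × String)))) :
    find_caesars odds_items = find_caesars_alt odds_items := by
  unfold find_caesars find_caesars_alt
  rw [pvLoopB_eq]
  cases h1 : odds_items.find? (fun it => pvName it == "consensus") with
  | some r => simp
  | none =>
    cases h2 : odds_items.find? (fun it => pvName it == "Caesars Sportsbook") with
    | some r => simp [Option.or]
    | none =>
      cases h3 : odds_items.find? (fun it => pvName it == "DraftKings") with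
      | some r => simp [Option.or]
      | none =>
        cases odds_items with
        | nil => simp [Option.or]
        | cons h t => simp [Option.or, PySem.List.pyGet?, PySem.List.pyIdx?]

-- ===== VERDICT (by name: the statement is the Claim_ definition above) =====
theorem find_caesars_spec : Claim_equal_find_caesars := by
  intro odds_items _ _
  unfold Spec_find_caesars
  exact ports_eq odds_items
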